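-- pv_equiv track=rewrite | github.com/bazthedev/SolsScope | lib/utils.py | resolve_full_aura_name
-- ===== SOURCE A (Python) =====
-- def resolve_full_aura_name(partial_name: str, aura_dict : dict) -> str:
--
--     partial_lower = partial_name.lower()
--     matches = [full_name for full_name in aura_dict if full_name.lower().startswith(partial_lower)]
--
--     if not matches:
--         return partial_name
--     if len(matches) == 1:
--         return matches[0]
--
--     return min(matches, key=len)
-- ===== SOURCE B (Python) =====
-- def resolve_full_aura_name(partial_name: str, aura_dict: dict) -> str:
--     partial_lower = partial_name.lower()
--     for full_name in sorted(aura_dict, key=len):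
--         if full_name.lower().startswith(partial_lower):
--             return full_name
--     return partial_name
-- ===== Notes on version B (the rewrite author's own statement) =====
-- stated objective: idiomatic
-- what changed: Replaces building a match list and taking min(key=len) (plus a redundant len==1 case) with a single early-return scan over the keys stably sorted by length, returning the first prefix match.
import Mathlib
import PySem

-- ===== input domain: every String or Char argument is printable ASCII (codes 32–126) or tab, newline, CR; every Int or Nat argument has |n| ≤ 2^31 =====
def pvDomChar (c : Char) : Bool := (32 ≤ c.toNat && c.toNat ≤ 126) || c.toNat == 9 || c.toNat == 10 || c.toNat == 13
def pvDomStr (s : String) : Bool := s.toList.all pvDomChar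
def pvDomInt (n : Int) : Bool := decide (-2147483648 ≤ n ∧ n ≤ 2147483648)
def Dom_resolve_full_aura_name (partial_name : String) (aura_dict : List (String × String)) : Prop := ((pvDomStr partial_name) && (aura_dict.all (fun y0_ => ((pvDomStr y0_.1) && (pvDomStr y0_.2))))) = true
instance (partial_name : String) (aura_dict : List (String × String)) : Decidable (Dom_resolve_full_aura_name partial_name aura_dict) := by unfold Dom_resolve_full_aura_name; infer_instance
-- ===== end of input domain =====

-- B replaces the match-list + min(key=len) of A by a first-match scan over the keys stably sorted by length (idiomatic, same cost class).


-- ===== PORT A =====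
def resolve_full_aura_name (partial_name : String) (aura_dict : List (String × String)) : String :=
  let partial_lower := PySem.Str.lower partial_name
  let matches_ := ((PySem.Dict.ofList aura_dict).keys).filter
    (fun full_name => PySem.Str.startswith (PySem.Str.lower full_name) partial_lower)
  if matches_ = [] then partial_name
  else if matches_.length = 1 then matches_.headD partial_name
  -- min over a nonempty list never raises; getD's default is unreachable here
  else (PySem.List.min? matches_ PySem.Str.len).getD partial_name

-- ===== PORT B =====
def resolve_full_aura_name_alt (partial_name : String) (aura_dict : List (String × String)) : String :=
  let partial_lower := PySem.Str.lower partial_name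
  match (PySem.List.sorted ((PySem.Dict.ofList aura_dict).keys) PySem.Str.len false).find?
      (fun full_name => PySem.Str.startswith (PySem.Str.lower full_name) partial_lower) with
  | some full_name => full_name
  | none => partial_name

-- ===== PRECONDITION & SPEC =====
def Spec_resolve_full_aura_name (partial_name : String) (aura_dict : List (String × String)) (out : String) : Prop := out = resolve_full_aura_name_alt partial_name aura_dict
instance (partial_name : String) (aura_dict : List (String × String)) (out : String) : Decidable (Spec_resolve_full_aura_name partial_name aura_dict out) := by unfold Spec_resolve_full_aura_name; infer_instance

-- ===== CLAIM (what is proved, stated in full; the proofs are below) =====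
def Claim_equal_resolve_full_aura_name : Prop := ∀ (partial_name : String) (aura_dict : List (String × String)), Dom_resolve_full_aura_name partial_name aura_dict → Spec_resolve_full_aura_name partial_name aura_dict (resolve_full_aura_name partial_name aura_dict)

-- ===== LEMMAS AND PROOFS =====

/-- One step of a first-minimum fold: how `min?` combines one extra element arriving on the right. -/
def minStep {α : Type} (key : α → Int) (p : α → Bool) (x : α) (o : Option α) : Option α :=
  if p x then
    match o with
    | none => some x
    | some m => if key x < key m then some x else some m
  else o

lemma find?_insertBy {α : Type} (key : α → Int) (p : α → Bool) (x : α) (l : List α)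
    (hl : l.Pairwise (fun a b => key a ≤ key b)) :
    (PySem.List.insertBy (fun a b => decide (key a < key b)) x l).find? p
      = minStep key p x (l.find? p) := by
  induction l with
  | nil =>
    by_cases hp : p x <;> simp [PySem.List.insertBy, minStep, List.find?, hp]
  | cons y ys ih =>
    rcases List.pairwise_cons.mp hl with ⟨hy, hys⟩
    by_cases hlt : key x < key y
    · simp only [PySem.List.insertBy, hlt, decide_true, if_true]
      by_cases hpx : p x
      · by_cases hpy : p y
        · simp [List.find?, hpx, hpy, minStep, hlt]
        · simp only [List.find?, hpx, hpy, minStep,]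
          cases hfind : ys.find? p with
          | none => simp
          | some m =>
            have hxm : key x < key m := lt_of_lt_of_le hlt (hy m (List.mem_of_find?_eq_some hfind))
            simp [hxm]
      · by_cases hpy : p y <;> simp [List.find?, hpx, hpy, minStep]
    · simp only [PySem.List.insertBy, hlt, decide_false, Bool.false_eq_true, if_false]
      by_cases hpy : p y
      · simp [List.find?, hpy, minStep, hlt]
      · simp only [List.find?, hpy]
        exact ih hys

lemma min?_append_singleton {α : Type} (key : α → Int) (p : α → Bool) (x : α) (ks : List α) :
    PySem.List.min? ((ks ++ [x]).filter p) key
      = minStep key p x (PySem.List.min? (ks.filter p) key) := by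
  by_cases hp : p x
  · simp only [PySem.List.min?, List.filter_append, hp, minStep, List.foldl_append,
      List.filter_cons_of_pos, List.filter_nil, if_pos]
    rfl
  · simp [PySem.List.min?, List.filter_append, hp, minStep]

/-- The first match of the key-sorted list is the first key-minimum of the matches. -/
lemma find?_sorted_eq_min?_filter {α : Type} (key : α → Int) (p : α → Bool) (ks : List α) :
    (PySem.List.sorted ks key false).find? p = PySem.List.min? (ks.filter p) key := by
  induction ks using List.reverseRecOn with
  | nil => simp [PySem.List.sorted, PySem.List.min?]
  | append_singleton ks x ih =>
    have hsort : PySem.List.sorted (ks ++ [x]) key false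
        = PySem.List.insertBy (fun a b => decide (key a < key b)) x
            (PySem.List.sorted ks key false) := by
      rw [PySem.List.sorted_eq_foldl_insertBy, PySem.List.sorted_eq_foldl_insertBy,
        List.foldl_append]
      rfl
    rw [hsort, find?_insertBy key p x _ (PySem.List.sorted_pairwise ks key), ih,
      min?_append_singleton]

/-- A's empty / length-1 / min chain over the match list is B's match on `min?`. -/
lemma ifchain_eq_match (pn : String) (ms : List String) :
    (if ms = [] then pn else if ms.length = 1 then ms.headD pn
     else (PySem.List.min? ms PySem.Str.len).getD pn)
      = (match PySem.List.min? ms PySem.Str.len with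
         | some full_name => full_name
         | none => pn) := by
  match ms with
  | [] => rfl
  | [a] => rfl
  | a :: b :: t =>
    simp only [List.length_cons, reduceCtorEq, if_false]
    have hne : (a :: b :: t) ≠ ([] : List String) := by simp
    cases h : PySem.List.min? (a :: b :: t) PySem.Str.len with
    | none => exact absurd ((PySem.List.min?_eq_none_iff _ _).mp h) hne
    | some m => simp

-- ===== VERDICT (by name: the statement is the Claim_ definition above) =====
theorem resolve_full_aura_name_spec : Claim_equal_resolve_full_aura_name := by
  intro partial_name aura_dict _
  unfold Spec_resolve_full_aura_name
  simp only [resolve_full_aura_name, resolve_full_aura_name_alt, ifchain_eq_match]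
  rw [find?_sorted_eq_min?_filter]
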